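-- pv_equiv track=rewrite | github.com/nrhinela/zoltag | src/zoltag/routers/images/core.py | _merge_seed_image_ids
-- ===== SOURCE A (Python) =====
-- from typing import Dict, List, Optional, Tuple
--
-- def _merge_seed_image_ids(
--     seed_groups: List[List[int]],
--     max_rows: int,
-- ) -> List[int]:
--     safe_limit = max(1, int(max_rows or 1))
--     merged: List[int] = []
--     seen = set()
--     for group in seed_groups:
--         for image_id in group:
--             image_id_int = int(image_id)
--             if image_id_int in seen:
--                 continue
--             seen.add(image_id_int)
--             merged.append(image_id_int)
--             if len(merged) >= safe_limit:
--                 return merged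
--     return merged
-- ===== SOURCE B (Python) =====
-- from typing import Dict, List, Optional, Tuple
--
-- def _merge_seed_image_ids(
--     seed_groups: List[List[int]],
--     max_rows: int,
-- ) -> List[int]:
--     safe_limit = max(1, int(max_rows or 1))
--     pending = [x for g in seed_groups for x in g]
--     merged: List[int] = []
--     while pending and len(merged) < safe_limit:
--         head = int(pending[0])
--         merged.append(head)
--         pending = [y for y in pending[1:] if int(y) != head]
--     return merged
-- ===== Notes on version B (the rewrite author's own statement) =====
-- stated objective: alternative
-- what changed: Replaces the seen-set nested loops with a selection-style 'nub by deletion': repeatedly take the head of a flattened pending list and filter out all its later duplicates, so no seen set (or dict) exists at all; trades linear dedup for a quadratic shrinking-list pass of similar code size.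
import Mathlib
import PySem

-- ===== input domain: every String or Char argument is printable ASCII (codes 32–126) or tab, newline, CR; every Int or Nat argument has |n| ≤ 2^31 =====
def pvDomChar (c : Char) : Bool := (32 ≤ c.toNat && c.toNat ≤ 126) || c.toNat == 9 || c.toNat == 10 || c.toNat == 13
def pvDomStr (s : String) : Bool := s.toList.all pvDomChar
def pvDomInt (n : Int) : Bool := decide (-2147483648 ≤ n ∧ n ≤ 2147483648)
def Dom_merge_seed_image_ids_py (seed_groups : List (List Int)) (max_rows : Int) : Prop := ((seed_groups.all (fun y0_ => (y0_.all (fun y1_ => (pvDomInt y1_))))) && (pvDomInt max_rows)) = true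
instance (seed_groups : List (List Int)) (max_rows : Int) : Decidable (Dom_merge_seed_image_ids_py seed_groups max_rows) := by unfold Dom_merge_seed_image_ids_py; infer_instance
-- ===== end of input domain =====

-- B replaces A's seen-set nested loops by a selection-style 'nub by deletion' over a shrinking
-- pending list (no seen set at all); alternative decomposition, same return value.


-- ===== PORT A =====
-- inner 'for image_id in group' loop: .inl = early 'return merged', .inr = fall through with state
def pvInnerA (safe_limit : Int) : List Int → List Int → PySem.Set Int → (List Int ⊕ (List Int × PySem.Set Int))
  | [], merged, seen => .inr (merged, seen)
  | image_id :: rest, merged, seen =>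
    -- int(image_id) = image_id on Int
    if PySem.Set.contains seen image_id then pvInnerA safe_limit rest merged seen
    else
      let seen' := PySem.Set.add seen image_id
      let merged' := merged ++ [image_id]
      if safe_limit ≤ PySem.List.len merged' then .inl merged'
      else pvInnerA safe_limit rest merged' seen'

-- outer 'for group in seed_groups' loop
def pvOuterA (safe_limit : Int) : List (List Int) → List Int → PySem.Set Int → List Int
  | [], merged, _ => merged
  | group :: rest, merged, seen =>
    match pvInnerA safe_limit group merged seen with
    | .inl r => r
    | .inr (m, s) => pvOuterA safe_limit rest m s

def merge_seed_image_ids_py (seed_groups : List (List Int)) (max_rows : Int) : List Int :=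
  let safe_limit := max 1 (if max_rows == 0 then 1 else max_rows)
  pvOuterA safe_limit seed_groups [] PySem.Set.empty

-- ===== PORT B =====
-- B's 'while pending and len(merged) < safe_limit' loop: pop the head into merged and
-- filter every later duplicate of it out of pending
def pvNubLoop (pending merged : List Int) (limit : Int) : List Int :=
  match pending with
  | [] => merged
  | head :: rest =>
    if (merged.length : Int) < limit then
      pvNubLoop (rest.filter (fun y => y != head)) (merged ++ [head]) limit
    else merged
termination_by pending.length
decreasing_by simpa using Nat.lt_succ_of_le (List.length_filter_le _ rest)

def merge_seed_image_ids_py_alt (seed_groups : List (List Int)) (max_rows : Int) : List Int :=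
  let safe_limit := max 1 (if max_rows == 0 then 1 else max_rows)
  let pending := seed_groups.flatMap (fun g => g)
  pvNubLoop pending [] safe_limit

-- ===== PRECONDITION & SPEC =====
def Spec_merge_seed_image_ids_py (seed_groups : List (List Int)) (max_rows : Int) (out : List Int) : Prop := out = merge_seed_image_ids_py_alt seed_groups max_rows
instance (seed_groups : List (List Int)) (max_rows : Int) (out : List Int) : Decidable (Spec_merge_seed_image_ids_py seed_groups max_rows out) := by unfold Spec_merge_seed_image_ids_py; infer_instance

-- ===== CLAIM (what is proved, stated in full; the proofs are below) =====
def Claim_equal_merge_seed_image_ids_py : Prop := ∀ (seed_groups : List (List Int)) (max_rows : Int), Dom_merge_seed_image_ids_py seed_groups max_rows → Spec_merge_seed_image_ids_py seed_groups max_rows (merge_seed_image_ids_py seed_groups max_rows)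

-- ===== LEMMAS AND PROOFS =====

-- Set.add only ever appends, so the accumulator is a prefix of any fold over it
theorem pv_prefix_foldl_add (xs : List Int) (s : PySem.Set Int) :
    s <+: xs.foldl PySem.Set.add s := by
  induction xs generalizing s with
  | nil => exact List.prefix_rfl
  | cons x xs ih =>
    simp only [List.foldl_cons]
    refine List.IsPrefix.trans ?_ (ih (PySem.Set.add s x))
    by_cases h : x ∈ s
    · simp [PySem.Set.add, h]
    · simp [PySem.Set.add, h]

-- A's inner loop, started with seen = merged, computes the dedup-fold, truncated on early return
theorem pv_inner_spec (limit : Int) (xs merged : List Int)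
    (hm : (merged.length : Int) < limit) :
    pvInnerA limit xs merged merged =
      (if limit ≤ ((xs.foldl PySem.Set.add merged).length : Int)
        then .inl ((xs.foldl PySem.Set.add merged).take limit.toNat)
        else .inr (xs.foldl PySem.Set.add merged, xs.foldl PySem.Set.add merged)) := by
  induction xs generalizing merged with
  | nil =>
    simp only [List.foldl_nil, pvInnerA]
    rw [if_neg (by omega)]
  | cons x xs ih =>
    simp only [List.foldl_cons, pvInnerA]
    by_cases h : PySem.Set.contains merged x
    · rw [if_pos h]
      have hx : x ∈ merged := by simpa [PySem.Set.contains] using h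
      have hadd : PySem.Set.add merged x = merged := by simp [PySem.Set.add, hx]
      rw [hadd]
      exact ih merged hm
    · rw [if_neg h]
      have hx : x ∉ merged := by simpa [PySem.Set.contains] using h
      have hadd : PySem.Set.add merged x = merged ++ [x] := by simp [PySem.Set.add, hx]
      simp only [PySem.List.len_eq]
      by_cases hl : limit ≤ ((merged ++ [x]).length : Int)
      · rw [if_pos hl]
        replace hl : limit ≤ (merged.length : Int) + 1 := by simpa using hl
        have hpre : (merged ++ [x]) <+: xs.foldl PySem.Set.add (PySem.Set.add merged x) := by
          rw [hadd]; exact pv_prefix_foldl_add xs (merged ++ [x])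
        obtain ⟨t, ht⟩ := hpre
        have hfl : limit ≤ ((xs.foldl PySem.Set.add (PySem.Set.add merged x)).length : Int) := by
          rw [← ht]; simp only [List.length_append, List.length_cons, List.length_nil]
          push_cast; omega
        have hlen : limit.toNat = (merged ++ [x]).length := by simp; omega
        rw [if_pos hfl, ← ht, hlen, List.take_append_of_le_length (le_refl _),
          List.take_of_length_le (le_refl _)]
      · rw [if_neg hl]
        replace hl : ¬ limit ≤ (merged.length : Int) + 1 := by simpa using hl
        rw [hadd]
        exact ih (merged ++ [x]) (by simp; omega)

-- A's outer loop computes the dedup-fold of the flattened groups, truncated when it reaches the limit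
theorem pv_outer_spec (limit : Int) (gs : List (List Int)) (merged : List Int)
    (hm : (merged.length : Int) < limit) :
    pvOuterA limit gs merged merged =
      (if limit ≤ (((gs.flatMap (fun g => g)).foldl PySem.Set.add merged).length : Int)
        then ((gs.flatMap (fun g => g)).foldl PySem.Set.add merged).take limit.toNat
        else (gs.flatMap (fun g => g)).foldl PySem.Set.add merged) := by
  induction gs generalizing merged with
  | nil =>
    simp only [List.flatMap_nil, List.foldl_nil, pvOuterA]
    rw [if_neg (by omega)]
  | cons g gs ih =>
    simp only [List.flatMap_cons, List.foldl_append, pvOuterA]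
    rw [pv_inner_spec limit g merged hm]
    set inner := g.foldl PySem.Set.add merged with hinner
    by_cases hl : limit ≤ ((inner.length : Int))
    · rw [if_pos hl]
      simp only
      obtain ⟨t, ht⟩ := pv_prefix_foldl_add (gs.flatMap (fun g => g)) inner
      have hfl : limit ≤ (((gs.flatMap (fun g => g)).foldl PySem.Set.add inner).length : Int) := by
        rw [← ht]; simp only [List.length_append]; push_cast; omega
      rw [if_pos hfl, ← ht, List.take_append_of_le_length (by omega)]
    · rw [if_neg hl]
      simp only
      exact ih inner (by omega)

-- splitting a dedup-fold: elements already in the accumulator are skipped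
theorem pv_foldl_add_split (xs : List Int) (s : List Int) :
    xs.foldl PySem.Set.add s
      = s ++ (xs.filter (fun y => !(s.contains y))).foldl PySem.Set.add [] := by
  induction hn : xs.length using Nat.strong_induction_on generalizing xs s with
  | _ n ihn =>
  have ih : ∀ (ys : List Int), ys.length < n → ∀ (s : List Int),
      ys.foldl PySem.Set.add s = s ++ (ys.filter (fun y => !(s.contains y))).foldl PySem.Set.add [] :=
    fun ys hy s => ihn _ hy ys s rfl
  cases xs with
  | nil => simp
  | cons x xs =>
    have hxs : xs.length < n := by rw [← hn]; simp
    simp only [List.foldl_cons, List.filter_cons]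
    by_cases h : x ∈ s
    · have hc : (!(s.contains x)) = false := by simp [h]
      have hadd : PySem.Set.add s x = s := by simp [PySem.Set.add, PySem.Set.contains, h]
      rw [hc, hadd]
      simpa using ih xs hxs s
    · have hc : (!(s.contains x)) = true := by simp [h]
      have hadd : PySem.Set.add s x = s ++ [x] := by simp [PySem.Set.add, PySem.Set.contains, h]
      have hadd2 : PySem.Set.add ([] : List Int) x = [x] := by simp [PySem.Set.add, PySem.Set.contains]
      rw [hadd, if_pos hc, List.foldl_cons, hadd2, ih xs hxs (s ++ [x]),
        ih (xs.filter (fun y => !(s.contains y))) (Nat.lt_of_le_of_lt (List.length_filter_le _ xs) hxs) [x]]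
      have hfilt : xs.filter (fun y => !((s ++ [x]).contains y))
          = (xs.filter (fun y => !(s.contains y))).filter (fun y => !(([x] : List Int).contains y)) := by
        rw [List.filter_filter]
        apply List.filter_congr
        intro y _
        simp only [List.contains_append]
        cases s.contains y <;> simp
      rw [hfilt, List.append_assoc]

-- head selection for the dedup-fold: dedup (x :: xs) = x :: dedup (xs with x filtered out)
theorem pv_N_cons (x : Int) (xs : List Int) :
    (x :: xs).foldl PySem.Set.add []
      = x :: (xs.filter (fun y => y != x)).foldl PySem.Set.add [] := by
  have h0 : PySem.Set.add ([] : List Int) x = [x] := by simp [PySem.Set.add, PySem.Set.contains]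
  rw [List.foldl_cons, h0, pv_foldl_add_split xs [x]]
  have hfilt : xs.filter (fun y => !(([x] : List Int).contains y)) = xs.filter (fun y => y != x) := by
    apply List.filter_congr
    intro y _
    by_cases hyx : y = x
    · simp [hyx]
    · simp [hyx, bne]
  rw [hfilt]
  rfl

-- B's loop appends the truncated dedup-fold of pending to merged
theorem pv_nubLoop_spec (pending : List Int) (merged : List Int) (limit : Int) :
    pvNubLoop pending merged limit
      = merged ++ (pending.foldl PySem.Set.add []).take (limit - merged.length).toNat := by
  induction hn : pending.length using Nat.strong_induction_on generalizing pending merged with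
  | _ n ih =>
  cases pending with
  | nil => simp [pvNubLoop]
  | cons x rest =>
    rw [pvNubLoop, pv_N_cons]
    by_cases hm : (merged.length : Int) < limit
    · rw [if_pos hm]
      have hlt : (rest.filter (fun y => y != x)).length < n := by
        subst hn
        exact Nat.lt_succ_of_le (List.length_filter_le _ rest)
      rw [ih _ hlt _ _ rfl]
      have h1 : (limit - (merged ++ [x]).length : Int).toNat = (limit - merged.length).toNat - 1 := by
        simp; omega
      have h2 : (limit - merged.length).toNat = ((limit - merged.length).toNat - 1) + 1 := by omega
      rw [h1, h2, List.take_succ_cons, List.append_assoc]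
      rfl
    · rw [if_neg hm]
      have : (limit - merged.length : Int).toNat = 0 := by omega
      simp [this]

theorem merge_seed_image_ids_py_eq (seed_groups : List (List Int)) (max_rows : Int) :
    merge_seed_image_ids_py seed_groups max_rows = merge_seed_image_ids_py_alt seed_groups max_rows := by
  simp only [merge_seed_image_ids_py, merge_seed_image_ids_py_alt]
  set limit := max 1 (if max_rows == 0 then 1 else max_rows) with hlim
  have h1 : (1 : Int) ≤ limit := le_max_left _ _
  have h0 : (([] : List Int).length : Int) < limit := by simp; omega
  rw [pv_nubLoop_spec, show (PySem.Set.empty : PySem.Set Int) = ([] : List Int) from rfl,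
    pv_outer_spec limit seed_groups [] h0]
  simp only [List.length_nil, Int.natCast_zero, Int.sub_zero, List.nil_append]
  split
  · rfl
  · rename_i hnot
    exact (List.take_of_length_le (by omega)).symm

-- ===== VERDICT (by name: the statement is the Claim_ definition above) =====
theorem merge_seed_image_ids_py_spec : Claim_equal_merge_seed_image_ids_py := by
  intro seed_groups max_rows _
  unfold Spec_merge_seed_image_ids_py
  exact merge_seed_image_ids_py_eq seed_groups max_rows
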